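-- pv_equiv track=rewrite | github.com/Alex-Soong/LSB_RS | rs_analyze.py | calcuRelate
-- ===== SOURCE A (Python) =====
-- def calcuRelate(_block, size=8):
--
--     pre = _block[0][0]
--     x = 0
--     y = 0
--     res = 0
--     for i in range(1, size*size):
--         pre = int(pre)
--         res += abs(int(_block[x][y]) - pre)
--         pre = _block[x][y]
--         if (x == 0 or x == 7) and y % 2 == 0:
--             y += 1
--         elif (y == 0 or y == 7) and x % 2 == 1:
--             x += 1
--         elif (x + y) % 2 == 1:
--             x += 1
--             y -= 1
--         else:
--             x -= 1
--             y += 1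
--     return res
-- ===== SOURCE B (Python) =====
-- def calcuRelate(_block, size=8):
--     # build the boustrophedon (zigzag) coordinate list by diagonal enumeration
--     coords = []
--     for d in range(2 * size - 1):
--         diag = [(x, d - x) for x in range(size) if 0 <= d - x < size]
--         if d % 2 == 0:
--             diag.reverse()
--         coords += diag
--     coords = coords[:size * size - 1]
--     return sum(abs(int(_block[x][y]) - int(_block[px][py]))
--                for (px, py), (x, y) in zip(coords, coords[1:]))
-- ===== Notes on version B (the rewrite author's own statement) =====
-- stated objective: alternative
-- what changed: A walks the 8x8 zigzag cell by cell with mutable (x,y,pre,res) state and branch logic per step; B first builds the zigzag coordinate list by diagonal enumeration (d = x+y, reversing even diagonals), truncates it to size*size-1 entries, and returns the sum of absolute differences over consecutive coordinate pairs.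
-- outside the precondition, e.g. on calcuRelate([[1, 2, 3, 4], [5, 6, 7], [9, 9]], 3): A returns 18, B returns 20
import Mathlib
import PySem

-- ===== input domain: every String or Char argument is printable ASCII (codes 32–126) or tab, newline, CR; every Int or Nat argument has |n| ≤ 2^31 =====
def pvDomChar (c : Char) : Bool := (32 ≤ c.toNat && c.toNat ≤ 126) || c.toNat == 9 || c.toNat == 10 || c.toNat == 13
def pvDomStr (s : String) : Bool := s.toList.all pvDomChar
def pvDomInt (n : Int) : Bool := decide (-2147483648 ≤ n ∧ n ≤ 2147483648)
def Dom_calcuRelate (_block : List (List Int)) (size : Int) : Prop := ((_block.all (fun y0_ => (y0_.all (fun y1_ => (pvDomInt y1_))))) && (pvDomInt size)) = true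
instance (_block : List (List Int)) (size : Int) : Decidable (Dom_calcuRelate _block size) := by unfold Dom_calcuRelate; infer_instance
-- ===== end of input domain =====

-- B replaces A's stateful boustrophedon walk by building the zigzag coordinate
-- list via diagonal enumeration and summing adjacent absolute differences
-- (objective: alternative decomposition, same cost).

-- shared helper: _block[x][y]; default 0 only reached outside Pre_ (Python raises there)
def pvGet (b : List (List Int)) (x y : Int) : Int :=
  PySem.List.pyGetD (PySem.List.pyGetD b x []) y 0

-- ===== PORT A =====
def calcuRelate (_block : List (List Int)) (size : Int) : Int :=
  let s0 : Int × Int × Int × Int := (pvGet _block 0 0, 0, 0, 0)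
  let sF := (PySem.List.pyRange 1 (size*size) 1).foldl
    (fun (s : Int × Int × Int × Int) _i =>
      let pre := s.1; let x := s.2.1; let y := s.2.2.1; let res := s.2.2.2
      let res' := res + |pvGet _block x y - pre|
      let pre' := pvGet _block x y
      if (x = 0 ∨ x = 7) ∧ y % 2 = 0 then (pre', x, y+1, res')
      else if (y = 0 ∨ y = 7) ∧ x % 2 = 1 then (pre', x+1, y, res')
      else if (x+y) % 2 = 1 then (pre', x+1, y-1, res')
      else (pre', x-1, y+1, res')) s0
  sF.2.2.2

-- ===== PORT B =====
def calcuRelate_alt (_block : List (List Int)) (size : Int) : Int :=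
  let coords := (PySem.List.pyRange 0 (2*size-1) 1).foldl (fun acc d =>
    let diag := (PySem.List.pyRange 0 size 1).filterMap
      (fun x => if 0 ≤ d - x ∧ d - x < size then some (x, d - x) else none)
    let diag := if d % 2 = 0 then diag.reverse else diag
    acc ++ diag) ([] : List (Int × Int))
  let coords := PySem.List.slice coords none (some (size*size - 1))
  (coords.zip (PySem.List.slice coords (some 1) none)).foldl
    (fun res pq => res + |pvGet _block pq.2.1 pq.2.2 - pvGet _block pq.1.1 pq.1.2|) 0

-- ===== PRECONDITION & SPEC =====
-- Pre_ excludes sizes other than 8 (apart from size = 2, where both programs read the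
-- same three cells, and the degenerate |size| ≤ 1, where the loop body never runs):
-- for such sizes A's hardcoded bound 7 makes the walk raise IndexError on any
-- size×size block (it only returns on accidentally oversized ragged blocks, along a
-- path that is an artefact of the 8×8 constants); it also excludes blocks too small
-- for A's accesses, on which A raises IndexError (A never reads cell (7,7), so row 7
-- only needs 7 entries).
def Pre_calcuRelate (_block : List (List Int)) (size : Int) : Prop :=
  (size = 8 ∧ 8 ≤ _block.length ∧ (∀ r ∈ _block.take 7, 8 ≤ r.length) ∧
    7 ≤ ((_block.drop 7).headD []).length)
  ∨ (size = 2 ∧ 2 ≤ _block.length ∧ 2 ≤ (_block.headD []).length ∧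
      (_block.drop 1).headD [] ≠ [])
  ∨ ((size = -1 ∨ size = 0 ∨ size = 1) ∧ _block ≠ [] ∧ _block.headD [] ≠ [])
instance (_block : List (List Int)) (size : Int) : Decidable (Pre_calcuRelate _block size) := by unfold Pre_calcuRelate; infer_instance

def pvWitness_calcuRelate : List (List Int) × Int :=
  (List.replicate 8 [1, 2, 3, 4, 5, 6, 7, 8], 8)

def Spec_calcuRelate (_block : List (List Int)) (size : Int) (out : Int) : Prop := out = calcuRelate_alt _block size
instance (_block : List (List Int)) (size : Int) (out : Int) : Decidable (Spec_calcuRelate _block size out) := by unfold Spec_calcuRelate; infer_instance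

-- ===== CLAIM (what is proved, stated in full; the proofs are below) =====
def Claim_equal_calcuRelate : Prop := ∀ (_block : List (List Int)) (size : Int), Dom_calcuRelate _block size → Pre_calcuRelate _block size → Spec_calcuRelate _block size (calcuRelate _block size)

-- ===== LEMMAS AND PROOFS =====

set_option maxHeartbeats 4000000 in
theorem calcuRelate_eq_alt_at_8 (b : List (List Int)) :
    calcuRelate b 8 = calcuRelate_alt b 8 := by
  simp [calcuRelate, calcuRelate_alt, PySem.List.pyRange, PySem.List.slice,
    PySem.List.clampIdx, List.range_succ]

set_option maxHeartbeats 1000000 in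
theorem calcuRelate_eq_alt_at_2 (b : List (List Int)) :
    calcuRelate b 2 = calcuRelate_alt b 2 := by
  simp [calcuRelate, calcuRelate_alt, PySem.List.pyRange, PySem.List.slice,
    PySem.List.clampIdx, List.range_succ]

set_option maxHeartbeats 1000000 in
theorem calcuRelate_eq_alt_degenerate (b : List (List Int)) (s : Int)
    (h : s = -1 ∨ s = 0 ∨ s = 1) : calcuRelate b s = calcuRelate_alt b s := by
  rcases h with h | h | h <;> subst h <;>
    simp [calcuRelate, calcuRelate_alt, PySem.List.pyRange, PySem.List.slice,
      PySem.List.clampIdx, List.range_succ]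

-- ===== VERDICT (by name: the statement is the Claim_ definition above) =====
theorem calcuRelate_spec : Claim_equal_calcuRelate := by
  intro b size _ hpre
  unfold Spec_calcuRelate
  rcases hpre with ⟨h8, -⟩ | ⟨h2, -⟩ | ⟨h, -, -⟩
  · subst h8; exact calcuRelate_eq_alt_at_8 b
  · subst h2; exact calcuRelate_eq_alt_at_2 b
  · exact calcuRelate_eq_alt_degenerate b size h
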